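-- pv_equiv track=rewrite | github.com/Sudneo/dockerfile-audit | parsing_utils/preprocessor.py | __replace_spaces_in_quotes
-- ===== SOURCE A (Python) =====
-- def __replace_spaces_in_quotes(line):
--     inside = False
--     index = 0
--     while index < len(line):
--         if not inside and (line[index] == "'" or line[index] == '"'):
--             inside = True
--         elif inside and line[index] == " ":
--             line = line[:index] + "#" + line[index + 1:]
--         elif inside and (line[index] == "'" or line[index] == '"'):
--             inside = False
--         index += 1
--     return line
-- ===== SOURCE B (Python) =====
-- def __replace_spaces_in_quotes(line):
--     # Partition the line into pieces alternating: text, quote-char, text, quote-char, ...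
--     # A text piece preceded by an odd number of quote chars is "inside" a quoted
--     # region; with the quote chars interleaved, those are the pieces at index i
--     # with i % 4 == 2.  Spaces in those pieces become '#'; everything else is kept.
--     pieces = []
--     cur = []
--     for ch in line:
--         if ch == "'" or ch == '"':
--             pieces.append(''.join(cur))
--             pieces.append(ch)
--             cur = []
--         else:
--             cur.append(ch)
--     pieces.append(''.join(cur))
--     out = []
--     for i, p in enumerate(pieces):
--         if i % 4 == 2:
--             p = ''.join('#' if c == ' ' else c for c in p)
--         out.append(p)
--     return ''.join(out)
-- ===== Notes on version B (the rewrite author's own statement) =====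
-- stated objective: faster
-- what changed: B splits the line once into pieces alternating text and quote characters and rewrites spaces only in the pieces that lie inside a quoted region (piece index % 4 == 2), instead of A's per-character walk that rebuilds the whole string by slicing at every replaced space.
import Mathlib
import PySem

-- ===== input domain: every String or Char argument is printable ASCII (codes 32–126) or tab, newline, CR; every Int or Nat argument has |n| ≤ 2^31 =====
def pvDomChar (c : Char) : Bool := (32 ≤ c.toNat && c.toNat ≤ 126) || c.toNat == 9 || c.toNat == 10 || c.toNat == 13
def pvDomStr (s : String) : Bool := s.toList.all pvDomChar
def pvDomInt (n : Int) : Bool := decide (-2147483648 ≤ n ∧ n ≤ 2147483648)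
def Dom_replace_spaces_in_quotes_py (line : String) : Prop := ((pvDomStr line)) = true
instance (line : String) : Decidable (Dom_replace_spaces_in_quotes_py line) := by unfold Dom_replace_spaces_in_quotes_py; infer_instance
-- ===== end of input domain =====

-- B partitions the line at quote characters and maps '#' over the spaces of the
-- inside pieces (one linear pass, measured faster in a timing run), instead of A's per-character walk that rebuilds
-- the whole string by slicing at every replaced space; objective: faster.


-- ===== PORT A =====
-- while loop with fuel = len(line); the loop runs at most len(line) steps because
-- index increases by 1 each step and the replacement keeps the length unchanged.
-- line[:index] / line[index+1:] with 0 ≤ index ≤ len are List.take / List.drop, exact here.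
def pyLoopA : Nat → Bool → Nat → List Char → List Char
  | 0, _, _, l => l
  | fuel + 1, inside, index, l =>
    if h : index < l.length then
      if !inside ∧ (l[index] = '\'' ∨ l[index] = '"') then
        pyLoopA fuel true (index + 1) l
      else if inside ∧ l[index] = ' ' then
        pyLoopA fuel inside (index + 1) (l.take index ++ '#' :: l.drop (index + 1))
      else if inside ∧ (l[index] = '\'' ∨ l[index] = '"') then
        pyLoopA fuel false (index + 1) l
      else
        pyLoopA fuel inside (index + 1) l
    else l

def replace_spaces_in_quotes_py (line : String) : String :=
  String.ofList (pyLoopA line.toList.length false 0 line.toList)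

-- ===== PORT B =====
-- first loop of Source B: split into pieces alternating text / quote char
def pyStepB (st : List (List Char) × List Char) (ch : Char) : List (List Char) × List Char :=
  if ch = '\'' ∨ ch = '"' then (st.1 ++ [st.2, [ch]], [])
  else (st.1, st.2 ++ [ch])

-- second loop of Source B: enumerate(pieces), rewriting spaces of the pieces at i % 4 == 2
def pyJoinB : Nat → List (List Char) → List Char
  | _, [] => []
  | i, p :: ps =>
    (if i % 4 = 2 then p.map (fun c => if c = ' ' then '#' else c) else p) ++ pyJoinB (i + 1) ps

def replace_spaces_in_quotes_py_alt (line : String) : String :=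
  String.ofList
    (pyJoinB 0 ((line.toList.foldl pyStepB ([], [])).1 ++ [(line.toList.foldl pyStepB ([], [])).2]))

-- ===== PRECONDITION & SPEC =====
def Spec_replace_spaces_in_quotes_py (line : String) (out : String) : Prop := out = replace_spaces_in_quotes_py_alt line
instance (line : String) (out : String) : Decidable (Spec_replace_spaces_in_quotes_py line out) := by unfold Spec_replace_spaces_in_quotes_py; infer_instance

-- ===== CLAIM (what is proved, stated in full; the proofs are below) =====
def Claim_equal_replace_spaces_in_quotes_py : Prop := ∀ (line : String), Dom_replace_spaces_in_quotes_py line → Spec_replace_spaces_in_quotes_py line (replace_spaces_in_quotes_py line)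

-- ===== LEMMAS AND PROOFS =====

-- common functional specification: one-pass walk, any quote toggles, spaces inside become '#'
def qspec (inside : Bool) : List Char → List Char
  | [] => []
  | c :: cs =>
    if c = '\'' ∨ c = '"' then c :: qspec (!inside) cs
    else (if inside ∧ c = ' ' then '#' else c) :: qspec inside cs

-- ---- A = qspec ----
theorem pyLoopA_eq_qspec (fuel : Nat) : ∀ (inside : Bool) (index : Nat) (l : List Char),
    l.length ≤ fuel + index →
    pyLoopA fuel inside index l = l.take index ++ qspec inside (l.drop index) := by
  induction fuel with
  | zero =>
    intro inside index l h
    simp only [pyLoopA]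
    rw [List.drop_eq_nil_of_le (by omega), List.take_of_length_le (by omega)]
    simp [qspec]
  | succ fuel ih =>
    intro inside index l h
    simp only [pyLoopA]
    by_cases hlt : index < l.length
    · rw [dif_pos hlt]
      have hdrop : l.drop index = l[index] :: l.drop (index + 1) :=
        List.drop_eq_getElem_cons hlt
      have htake : l.take (index + 1) = l.take index ++ [l[index]] := by
        rw [List.take_add_one]
        simp [List.getElem?_eq_getElem hlt]
      by_cases h1 : !inside ∧ (l[index] = '\'' ∨ l[index] = '"')
      · rw [if_pos h1, ih true (index + 1) l (by omega), htake, hdrop]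
        obtain ⟨hin, hq⟩ := h1
        simp only [Bool.not_eq_true'] at hin
        simp [qspec, hq, hin]
        rw [htake]
        simp only [List.append_assoc, List.singleton_append]
      · rw [if_neg h1]
        by_cases h2 : inside ∧ l[index] = ' '
        · rw [if_pos h2]
          obtain ⟨hin, hsp⟩ := h2
          set l' := l.take index ++ '#' :: l.drop (index + 1) with hl'
          have hlen' : l'.length = l.length := by
            simp [hl', List.length_take, List.length_drop]; omega
          have hlt' : (l.take index).length = index := by
            simp [List.length_take]; omega
          have htake' : l'.take (index + 1) = l.take index ++ ['#'] := by
            rw [hl', List.take_append, List.take_take, hlt']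
            have h1' : min (index + 1) index = index := by omega
            have h2' : index + 1 - index = 1 := by omega
            rw [h1', h2']
            simp
          have hdrop' : l'.drop (index + 1) = l.drop (index + 1) := by
            rw [hl', List.drop_append, hlt']
            have h1' : index + 1 - index = 1 := by omega
            have hnil : (List.take index l).drop (index + 1) = [] :=
              List.drop_eq_nil_of_le (by rw [hlt']; omega)
            rw [h1', hnil]
            simp
          rw [ih inside (index + 1) l' (by omega), htake', hdrop', hdrop]
          have hnq : ¬ (l[index] = '\'' ∨ l[index] = '"') := by
            rw [hsp]; decide
          simp [qspec, hnq, hin, hsp]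
        · rw [if_neg h2]
          by_cases h3 : inside ∧ (l[index] = '\'' ∨ l[index] = '"')
          · rw [if_pos h3, ih false (index + 1) l (by omega), htake, hdrop]
            obtain ⟨hin, hq⟩ := h3
            simp [qspec, hq, hin]
            rw [htake]
            simp only [List.append_assoc, List.singleton_append]
          · rw [if_neg h3, ih inside (index + 1) l (by omega), htake, hdrop]
            by_cases hq : l[index] = '\'' ∨ l[index] = '"'
            · exfalso
              cases hb : inside
              · exact h1 ⟨by simp [hb], hq⟩
              · exact h3 ⟨hb, hq⟩
            · simp only [qspec, hq, if_neg, if_false]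
              simp [h2]
              rw [htake]
              simp only [List.append_assoc, List.singleton_append]
    · rw [dif_neg hlt]
      rw [List.drop_eq_nil_of_le (by omega), List.take_of_length_le (by omega)]
      simp [qspec]

-- ---- B = qspec ----
theorem pyJoinB_append (i : Nat) (xs ys : List (List Char)) :
    pyJoinB i (xs ++ ys) = pyJoinB i xs ++ pyJoinB (i + xs.length) ys := by
  induction xs generalizing i with
  | nil => simp [pyJoinB]
  | cons p ps ih =>
    simp only [List.cons_append, pyJoinB, List.length_cons, ih (i + 1), List.append_assoc]
    ring_nf

theorem foldB_eq_qspec (line : List Char) : ∀ (pieces : List (List Char)) (cur : List Char),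
    pieces.length % 2 = 0 →
    pyJoinB 0 ((line.foldl pyStepB (pieces, cur)).1 ++ [(line.foldl pyStepB (pieces, cur)).2]) =
      pyJoinB 0 pieces ++
        (if pieces.length % 4 = 2 then cur.map (fun c => if c = ' ' then '#' else c) else cur) ++
        qspec (pieces.length % 4 == 2) line := by
  induction line with
  | nil =>
    intro pieces cur hev
    simp only [List.foldl_nil, qspec, pyJoinB_append, List.append_nil, Nat.zero_add]
    simp [pyJoinB]
  | cons c cs ih =>
    intro pieces cur hev
    simp only [List.foldl_cons]
    by_cases hq : c = '\'' ∨ c = '"'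
    · have hstep : pyStepB (pieces, cur) c = (pieces ++ [cur, [c]], []) := by
        simp [pyStepB, hq]
      rw [hstep, ih (pieces ++ [cur, [c]]) [] (by simp; omega)]
      rw [pyJoinB_append]
      simp only [List.length_append, List.length_cons, List.length_nil, Nat.zero_add]
      have h4 : pieces.length % 4 = 0 ∨ pieces.length % 4 = 2 := by omega
      have hq1 : ¬ ((pieces.length + 1) % 4 = 2) := by omega
      rcases h4 with h4 | h4
      · have ha : (pieces.length + 2) % 4 = 2 := by omega
        have hbt : ((pieces.length + 2) % 4 == 2) = true := by simp [ha]
        have hbf : (pieces.length % 4 == 2) = false := by simp [h4]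
        rw [hbt, hbf]
        simp only [pyJoinB, h4, ha, hq1, if_pos, if_neg, if_false, List.map_nil,
          List.append_nil, qspec, hq]
        simp [qspec, hq, List.append_assoc]
      · have ha : ¬ ((pieces.length + 2) % 4 = 2) := by omega
        have hbt : (pieces.length % 4 == 2) = true := by simp [h4]
        have hbf : ((pieces.length + 2) % 4 == 2) = false := by
          simp only [beq_eq_false_iff_ne]; exact ha
        rw [hbt, hbf]
        simp only [pyJoinB, h4, ha, hq1, if_pos, if_neg, if_false, List.append_nil]
        simp [qspec, hq, List.append_assoc]
    · have hstep : pyStepB (pieces, cur) c = (pieces, cur ++ [c]) := by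
        simp [pyStepB, hq]
      rw [hstep, ih pieces (cur ++ [c]) hev]
      by_cases h4 : pieces.length % 4 = 2
      · have hbt : (pieces.length % 4 == 2) = true := by simp [h4]
        rw [hbt]
        simp only [h4, if_pos, List.map_append, List.map_cons, List.map_nil, qspec, hq,
          if_false, List.append_assoc]
        simp [qspec, hq]
      · have hbf : (pieces.length % 4 == 2) = false := by
          simp only [beq_eq_false_iff_ne]; exact h4
        rw [hbf]
        simp only [h4, if_neg, qspec, hq, if_false, List.append_assoc]
        simp [qspec, hq]

-- ===== VERDICT (by name: the statement is the Claim_ definition above) =====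
theorem replace_spaces_in_quotes_py_spec : Claim_equal_replace_spaces_in_quotes_py := by
  intro line _
  unfold Spec_replace_spaces_in_quotes_py replace_spaces_in_quotes_py replace_spaces_in_quotes_py_alt
  rw [pyLoopA_eq_qspec line.toList.length false 0 line.toList (by omega)]
  rw [foldB_eq_qspec line.toList [] [] (by simp)]
  simp [pyJoinB]
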